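-- pv_equiv track=rewrite | github.com/RonakornST/BE_CUEE | Heuristic_optimization/tryezgenetic.py | evaluate_path
-- ===== SOURCE A (Python) =====
-- GRID_SIZE = (10, 10)
--
-- start = (0, 0)
--
-- goal = (9, 9)
--
-- obstacles = {(3, 3), (3, 4), (3, 5), (4, 3), (5, 3)}
--
-- def evaluate_path(path):
--     position = start
--     fitness = 50  # Base fitness
--
--     for move in path:
--         next_position = (position[0] + move[0], position[1] + move[1])
--
--         # Check if within grid bounds
--         if 0 <= next_position[0] < GRID_SIZE[0] and 0 <= next_position[1] < GRID_SIZE[1]: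
--             position = next_position
--
--             # Penalty if on obstacle
--             if position in obstacles:
--                 fitness -= 10
--
--             # Reward proximity to the goal
--             fitness -= abs(goal[0] - position[0]) + abs(goal[1] - position[1])
--         else:
--             fitness -= 15  # Penalty for going out of bounds
--
--     # Reward reaching the goal with a high bonus
--     if position == goal:
--         fitness += 200
--
--     return max(fitness, 1)
-- ===== SOURCE B (Python) =====
-- GRID_SIZE = (10, 10)
-- start = (0, 0)
-- goal = (9, 9)
-- obstacles = {(3, 3), (3, 4), (3, 5), (4, 3), (5, 3)}
--
-- def evaluate_path(path):
--     # Pass 1: simulate the trajectory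
--     pos = start
--     visited = []
--     rejected = 0
--     for dx, dy in path:
--         nx, ny = pos[0] + dx, pos[1] + dy
--         if 0 <= nx < GRID_SIZE[0] and 0 <= ny < GRID_SIZE[1]:
--             pos = (nx, ny)
--             visited.append(pos)
--         else:
--             rejected += 1
--     # Pass 2: score the trajectory
--     fitness = (50
--                - sum(abs(goal[0] - x) + abs(goal[1] - y) for x, y in visited)
--                - 10 * sum(1 for p in visited if p in obstacles)
--                - 15 * rejected)
--     if (visited[-1] if visited else start) == goal:
--         fitness += 200
--     return max(fitness, 1)
-- ===== Notes on version B (the rewrite author's own statement) =====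
-- stated objective: alternative
-- what changed: B separates simulation from scoring: a first pass builds the list of accepted positions and counts rejected moves, then the score is computed by independent passes (distance sum, obstacle count, last position) over that trajectory, instead of A's single loop mutating one fitness accumulator.
import Mathlib
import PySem

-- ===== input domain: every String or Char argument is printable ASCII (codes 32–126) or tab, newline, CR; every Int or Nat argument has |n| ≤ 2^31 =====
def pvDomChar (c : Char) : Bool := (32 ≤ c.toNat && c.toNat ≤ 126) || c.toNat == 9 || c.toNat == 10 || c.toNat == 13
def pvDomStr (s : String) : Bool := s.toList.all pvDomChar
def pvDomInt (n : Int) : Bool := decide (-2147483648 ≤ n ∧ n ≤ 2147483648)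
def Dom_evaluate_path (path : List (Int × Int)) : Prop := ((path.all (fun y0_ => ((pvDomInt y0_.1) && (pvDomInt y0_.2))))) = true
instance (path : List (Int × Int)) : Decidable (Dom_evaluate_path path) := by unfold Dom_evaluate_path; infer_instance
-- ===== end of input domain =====

-- B splits A's single scoring loop into a simulation pass that records the trajectory
-- and separate scoring passes over it (alternative decomposition; return value only).

-- ===== PORT A =====
def pvObstacles : List (Int × Int) := [(3,3), (3,4), (3,5), (4,3), (5,3)]

def pvStepA (s : (Int × Int) × Int) (move : Int × Int) : (Int × Int) × Int :=
  let np : Int × Int := (s.1.1 + move.1, s.1.2 + move.2)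
  if 0 ≤ np.1 ∧ np.1 < 10 ∧ 0 ≤ np.2 ∧ np.2 < 10 then
    let f1 := if np ∈ pvObstacles then s.2 - 10 else s.2
    (np, f1 - (|9 - np.1| + |9 - np.2|))
  else
    (s.1, s.2 - 15)

def evaluate_path (path : List (Int × Int)) : Int :=
  let st := path.foldl pvStepA ((0, 0), 50)
  let f := if st.1 = ((9 : Int), (9 : Int)) then st.2 + 200 else st.2
  max f 1

-- ===== PORT B =====
-- simulation pass: list of accepted positions (in order) and the rejected-move count
def pvSimB : List (Int × Int) → (Int × Int) → List (Int × Int) × Int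
  | [], _ => ([], 0)
  | m :: ms, pos =>
    let np : Int × Int := (pos.1 + m.1, pos.2 + m.2)
    if 0 ≤ np.1 ∧ np.1 < 10 ∧ 0 ≤ np.2 ∧ np.2 < 10 then
      let r := pvSimB ms np
      (np :: r.1, r.2)
    else
      let r := pvSimB ms pos
      (r.1, r.2 + 1)

def evaluate_path_alt (path : List (Int × Int)) : Int :=
  let sim := pvSimB path (0, 0)
  let visited := sim.1
  let rejected := sim.2
  let fitness := 50 - (visited.map (fun p => |9 - p.1| + |9 - p.2|)).sum
      - 10 * ((visited.filter (fun p => p ∈ pvObstacles)).length : Int)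
      - 15 * rejected
  let f := if visited.getLastD (0, 0) = ((9 : Int), (9 : Int)) then fitness + 200 else fitness
  max f 1

-- ===== PRECONDITION & SPEC =====
def Spec_evaluate_path (path : List (Int × Int)) (out : Int) : Prop := out = evaluate_path_alt path
instance (path : List (Int × Int)) (out : Int) : Decidable (Spec_evaluate_path path out) := by unfold Spec_evaluate_path; infer_instance

-- ===== CLAIM (what is proved, stated in full; the proofs are below) =====
def Claim_equal_evaluate_path : Prop := ∀ (path : List (Int × Int)), Dom_evaluate_path path → Spec_evaluate_path path (evaluate_path path)

-- ===== LEMMAS AND PROOFS =====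

-- cost of a trajectory as B scores it
def pvCost (v : List (Int × Int)) (r : Int) : Int :=
  (v.map (fun p => |9 - p.1| + |9 - p.2|)).sum
    + 10 * ((v.filter (fun p => p ∈ pvObstacles)).length : Int) + 15 * r

theorem pvCost_cons (p : Int × Int) (v : List (Int × Int)) (r : Int) :
    pvCost (p :: v) r
      = (|9 - p.1| + |9 - p.2|) + (if p ∈ pvObstacles then 10 else 0) + pvCost v r := by
  simp only [pvCost, List.map_cons, List.sum_cons]
  by_cases hd : p ∈ pvObstacles
  · rw [if_pos hd, List.filter_cons_of_pos (by simpa using hd), List.length_cons]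
    push_cast; ring
  · rw [if_neg hd, List.filter_cons_of_neg (by simpa using hd)]
    ring

theorem pvCost_rej (v : List (Int × Int)) (r : Int) :
    pvCost v (r + 1) = pvCost v r + 15 := by
  simp only [pvCost]; ring

theorem pvFold_eq (path : List (Int × Int)) :
    ∀ (pos : Int × Int) (f : Int),
      path.foldl pvStepA (pos, f)
        = ((pvSimB path pos).1.getLastD pos, f - pvCost (pvSimB path pos).1 (pvSimB path pos).2) := by
  induction path with
  | nil => intro pos f; simp [pvSimB, pvCost]
  | cons m ms ih =>
    intro pos f
    simp only [List.foldl_cons, pvStepA, pvSimB]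
    by_cases h : 0 ≤ pos.1 + m.1 ∧ pos.1 + m.1 < 10 ∧ 0 ≤ pos.2 + m.2 ∧ pos.2 + m.2 < 10
    · simp only [if_pos h, ih, List.getLastD_cons]
      refine congrArg₂ Prod.mk rfl ?_
      rw [pvCost_cons]
      by_cases ho : (pos.1 + m.1, pos.2 + m.2) ∈ pvObstacles <;> simp only [ho, ite_true, ite_false] <;> ring
    · simp only [if_neg h, ih, pvCost_rej]
      refine congrArg₂ Prod.mk rfl ?_
      ring

-- ===== VERDICT (by name: the statement is the Claim_ definition above) =====
theorem evaluate_path_spec : Claim_equal_evaluate_path := by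
  intro path _
  unfold Spec_evaluate_path evaluate_path evaluate_path_alt
  simp only [pvFold_eq]
  by_cases h : (pvSimB path (0, 0)).1.getLastD (0, 0) = ((9 : Int), (9 : Int)) <;>
    simp only [h, if_pos, if_neg, not_false_iff] <;>
    (congr 1; simp only [pvCost]; ring)
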